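-- pv_equiv track=rewrite | github.com/MrBrantCode/unitest_baseline | mut_generate/mist_train_cf/cf_84162/solution.py | solve
-- ===== SOURCE A (Python) =====
-- def solve(n):
--     primes = [True] * (n+1)
--     p = 2
--     while p**2 <= n:
--         if primes[p] == True:
--             for i in range(p**2, n+1, p):
--                 primes[i] = False
--         p += 1
--
--     prime_numbers = [p for p in range(2, n) if primes[p]]
--     return len(prime_numbers), sum(prime_numbers)
-- ===== SOURCE B (Python) =====
-- def solve(n):
--     count = 0
--     total = 0
--     for k in range(2, n):
--         is_prime = True
--         d = 2
--         while d * d <= k: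
--             if k % d == 0:
--                 is_prime = False
--                 break
--             d += 1
--         if is_prime:
--             count += 1
--             total += k
--     return count, total
-- ===== Notes on version B (the rewrite author's own statement) =====
-- stated objective: alternative
-- what changed: Replaces the sieve-of-Eratosthenes boolean array with per-number trial division (d*d <= k) accumulating count and sum in one pass, with no auxiliary array.
import Mathlib
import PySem

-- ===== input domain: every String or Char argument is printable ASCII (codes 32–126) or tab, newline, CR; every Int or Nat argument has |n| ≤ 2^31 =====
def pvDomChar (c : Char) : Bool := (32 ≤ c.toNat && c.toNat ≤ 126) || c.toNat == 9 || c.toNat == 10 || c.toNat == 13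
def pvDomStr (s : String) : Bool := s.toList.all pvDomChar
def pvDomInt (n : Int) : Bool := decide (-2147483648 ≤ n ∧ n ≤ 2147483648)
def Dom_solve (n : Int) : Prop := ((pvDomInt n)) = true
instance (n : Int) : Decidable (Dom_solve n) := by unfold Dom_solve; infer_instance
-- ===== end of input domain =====

-- B replaces A's sieve array with per-number trial division (alternative algorithm, no auxiliary array).

-- ===== PORT A =====
-- inner 'for i in range(p**2, n+1, p): primes[i] = False'; every i here is ≥ p*p ≥ 0 and ≤ n < len(primes), so List.set is exact
def markMultiples (primes : List Bool) (r : List Int) : List Bool :=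
  r.foldl (fun l i => l.set i.toNat false) primes

-- the 'while p**2 <= n' loop; 'primes[p]' is always in range (2 ≤ p, p*p ≤ n), so pyGetD is exact there
def sieveLoop (n p : Int) (primes : List Bool) : List Bool :=
  if _h : p * p ≤ n then
    sieveLoop n (p + 1)
      (if PySem.List.pyGetD primes p true = true then
        markMultiples primes (PySem.List.pyRange (p * p) (n + 1) p)
      else primes)
  else primes
termination_by (n + 1 - p).toNat
decreasing_by
  by_cases hp : p ≤ 0
  · have : (0:Int) ≤ p * p := mul_self_nonneg p
    omega
  · have : p ≤ p * p := le_mul_of_one_le_left (by omega) (by omega)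
    omega

def solve (n : Int) : Int × Int :=
  let primes := PySem.List.pyRepeat [true] (n + 1)
  let primes := sieveLoop n 2 primes
  -- 'primes[p]' for p in range(2, n) is always in range, so pyGetD is exact
  let prime_numbers := (PySem.List.pyRange 2 n 1).filter (fun p => PySem.List.pyGetD primes p true)
  ((prime_numbers.length : Int), prime_numbers.sum)

-- ===== PORT B =====
-- the 'while d*d <= k' trial-division loop: false as soon as some d divides k, else d += 1
def trialLoop (k d : Int) : Bool :=
  if _h : d * d ≤ k then
    if PySem.Int.mod k d = 0 then false else trialLoop k (d + 1)
  else true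
termination_by (k + 1 - d).toNat
decreasing_by
  by_cases hd : d ≤ 0
  · have : (0:Int) ≤ d * d := mul_self_nonneg d
    omega
  · have : d ≤ d * d := le_mul_of_one_le_left (by omega) (by omega)
    omega

def solve_alt (n : Int) : Int × Int :=
  (PySem.List.pyRange 2 n 1).foldl
    (fun acc k => if trialLoop k 2 then (acc.1 + 1, acc.2 + k) else acc) (0, 0)

-- ===== PRECONDITION & SPEC =====
def Spec_solve (n : Int) (out : Int × Int) : Prop := out = solve_alt n
instance (n : Int) (out : Int × Int) : Decidable (Spec_solve n out) := by unfold Spec_solve; infer_instance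

-- ===== CLAIM (what is proved, stated in full; the proofs are below) =====
def Claim_equal_solve : Prop := ∀ (n : Int), Dom_solve n → Spec_solve n (solve n)

-- ===== LEMMAS AND PROOFS =====

-- the common characterisation: k has a divisor d with 2 ≤ d and d*d ≤ k
def hasSmallDiv (k : Int) : Prop := ∃ d : Int, 2 ≤ d ∧ d * d ≤ k ∧ d ∣ k

-- B side: the trial loop decides "no divisor e ≥ d with e*e ≤ k"
theorem trialLoop_iff (k d : Int) (hd : 2 ≤ d) :
    trialLoop k d = true ↔ ¬ ∃ e : Int, d ≤ e ∧ e * e ≤ k ∧ e ∣ k := by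
  induction d using trialLoop.induct (k := k) with
  | case1 d h hmod =>
    rw [trialLoop, dif_pos h, if_pos hmod]
    have hdvd : d ∣ k := (PySem.Int.mod_eq_zero_iff_dvd k d).mp hmod
    simp only [Bool.false_eq_true, false_iff, not_not]
    exact ⟨d, le_refl d, h, hdvd⟩
  | case2 d h hmod ih =>
    rw [trialLoop, dif_pos h, if_neg hmod]
    have hnd : ¬ d ∣ k := fun hdvd => hmod ((PySem.Int.mod_eq_zero_iff_dvd k d).mpr hdvd)
    rw [ih (by omega)]
    constructor
    · rintro hno ⟨e, he, h2, h3⟩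
      rcases eq_or_lt_of_le he with rfl | hlt
      · exact hnd h3
      · exact hno ⟨e, by omega, h2, h3⟩
    · rintro hno ⟨e, he, h2, h3⟩
      exact hno ⟨e, by omega, h2, h3⟩
  | case3 d h =>
    rw [trialLoop, dif_neg h]
    simp only [true_iff]
    rintro ⟨e, he, h2, h3⟩
    have : d * d ≤ e * e := mul_le_mul he he (by omega) (by omega)
    omega

-- A side: marking the multiples
theorem markMultiples_length (L : List Bool) (R : List Int) :
    (markMultiples L R).length = L.length := by
  induction R generalizing L with
  | nil => rfl
  | cons i R ih =>
    show (markMultiples (L.set i.toNat false) R).length = L.length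
    rw [ih, List.length_set]

theorem markMultiples_getD (L : List Bool) (R : List Int) (h0 : ∀ i ∈ R, 0 ≤ i) (j : Nat) :
    (markMultiples L R).getD j false =
      if (j : Int) ∈ R then false else L.getD j false := by
  induction R generalizing L with
  | nil => simp [markMultiples]
  | cons i R ih =>
    have hi : 0 ≤ i := h0 i (List.mem_cons_self ..)
    have hstep : (markMultiples L (i :: R)).getD j false
        = (markMultiples (L.set i.toNat false) R).getD j false := rfl
    rw [hstep, ih (L.set i.toNat false) (fun x hx => h0 x (List.mem_cons_of_mem _ hx))]
    by_cases hR : (j : Int) ∈ R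
    · simp [hR]
    · by_cases hij : i = (j : Int)
      · have hji : i.toNat = j := by omega
        have h1 : (L.set i.toNat false).getD j false = false := by
          rw [List.getD_eq_getElem?_getD, List.getElem?_set, if_pos hji]
          split <;> simp
        rw [if_neg hR, h1, if_pos (List.mem_cons.mpr (Or.inl hij.symm))]
      · have hne : i.toNat ≠ j := by omega
        have hmem : ¬ (j : Int) ∈ i :: R := by
          rw [List.mem_cons]
          rintro (h | h)
          · exact hij h.symm
          · exact hR h
        rw [if_neg hR, if_neg hmem, List.getD_eq_getElem?_getD,
          List.getD_eq_getElem?_getD, List.getElem?_set, if_neg hne]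

theorem sieveLoop_length (n p : Int) (primes : List Bool) :
    (sieveLoop n p primes).length = primes.length := by
  induction p, primes using sieveLoop.induct (n := n) with
  | case1 p primes h ih =>
    rw [sieveLoop, dif_pos h]
    by_cases hc : PySem.List.pyGetD primes p true = true
    · rw [dif_pos hc] at ih
      rw [if_pos hc, ih, markMultiples_length]
    · rw [dif_neg hc] at ih
      rw [if_neg hc, ih]
  | case2 p primes h => rw [sieveLoop, dif_neg h]

-- loop invariant for the sieve: after processing all q < p, a cell j ≤ n is false
-- exactly when some q with 2 ≤ q < p, q*q ≤ j divides j; running the loop from p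
-- yields the full small-divisor characterisation.
theorem sieveLoop_getD (n : Int) : ∀ (p : Int) (primes : List Bool), 2 ≤ p →
    primes.length = (n + 1).toNat →
    (∀ j : Nat, (j : Int) ≤ n →
      (primes.getD j false = true ↔
        ¬ ∃ q : Int, 2 ≤ q ∧ q < p ∧ q * q ≤ (j : Int) ∧ q ∣ (j : Int))) →
    ∀ j : Nat, (j : Int) ≤ n →
      ((sieveLoop n p primes).getD j false = true ↔ ¬ hasSmallDiv (j : Int)) := by
  intro p primes
  induction p, primes using sieveLoop.induct (n := n) with
  | case1 p primes h ih =>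
    intro hp hlen hinv
    have hple : p ≤ n := le_trans (le_mul_of_one_le_left (by omega) (by omega)) h
    rw [sieveLoop, dif_pos h]
    by_cases hc : PySem.List.pyGetD primes p true = true
    · rw [dif_pos hc] at ih
      rw [if_pos hc]
      apply ih (by omega) (by rw [markMultiples_length]; exact hlen)
      intro j hj
      have hnonneg : ∀ i ∈ PySem.List.pyRange (p * p) (n + 1) p, 0 ≤ i := by
        intro i hi
        have hm := (PySem.List.mem_pyRange_iff_of_pos (by omega) i).mp hi
        have := mul_self_nonneg p
        omega
      rw [markMultiples_getD _ _ hnonneg j]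
      have hpp : p ∣ p * p := dvd_mul_left p p
      have hmem : ((j : Int) ∈ PySem.List.pyRange (p * p) (n + 1) p) ↔
          (p * p ≤ (j : Int) ∧ p ∣ (j : Int)) := by
        rw [PySem.List.mem_pyRange_iff_of_pos (by omega)]
        constructor
        · rintro ⟨h1, _, h3⟩
          exact ⟨h1, by have := dvd_add h3 hpp; simpa using this⟩
        · rintro ⟨h1, h2⟩
          exact ⟨h1, by omega, dvd_sub h2 hpp⟩
      by_cases hm : p * p ≤ (j : Int) ∧ p ∣ (j : Int)
      · rw [if_pos (hmem.mpr hm)]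
        simp only [Bool.false_eq_true, false_iff, not_not]
        exact ⟨p, hp, by omega, hm.1, hm.2⟩
      · rw [if_neg (fun hx => hm (hmem.mp hx)), hinv j hj]
        apply not_congr
        constructor
        · rintro ⟨q, h1, h2, h3, h4⟩
          exact ⟨q, h1, by omega, h3, h4⟩
        · rintro ⟨q, h1, h2, h3, h4⟩
          by_cases hq : q = p
          · exact absurd ⟨hq ▸ h3, hq ▸ h4⟩ hm
          · exact ⟨q, h1, by omega, h3, h4⟩
    · rw [dif_neg hc] at ih
      rw [if_neg hc]
      apply ih (by omega) hlen
      intro j hj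
      rw [hinv j hj]
      -- primes[p] is false, so p itself has a small divisor q0 < p
      have hlt : p.toNat < primes.length := by rw [hlen]; omega
      have hfalse : primes.getD p.toNat false = false := by
        rw [PySem.List.pyGetD_eq_getElem primes true (by omega)
          (by rw [hlen]; omega)] at hc
        rw [List.getD_eq_getElem?_getD, List.getElem?_eq_getElem hlt]
        simpa using hc
      have hq0 : ∃ q0 : Int, 2 ≤ q0 ∧ q0 < p ∧ q0 * q0 ≤ p ∧ q0 ∣ p := by
        have hcast : ((p.toNat : Int)) = p := by omega
        have := hinv p.toNat (by omega)
        rw [hfalse, hcast] at this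
        simpa using (not_not.mp (fun hno => by simp [hno] at this))
      apply not_congr
      constructor
      · rintro ⟨q, h1, h2, h3, h4⟩
        exact ⟨q, h1, by omega, h3, h4⟩
      · rintro ⟨q, h1, h2, h3, h4⟩
        by_cases hq : q = p
        · obtain ⟨q0, g1, g2, g3, g4⟩ := hq0
          subst hq
          have hqq : q ≤ q * q := le_mul_of_one_le_left (by omega) (by omega)
          exact ⟨q0, g1, by omega, by omega, g4.trans h4⟩
        · exact ⟨q, h1, by omega, h3, h4⟩
  | case2 p primes h =>
    intro hp hlen hinv j hj
    rw [sieveLoop, dif_neg h, hinv j hj]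
    apply not_congr
    constructor
    · rintro ⟨q, h1, _, h3, h4⟩
      exact ⟨q, h1, h3, h4⟩
    · rintro ⟨q, h1, h3, h4⟩
      refine ⟨q, h1, ?_, h3, h4⟩
      by_contra hqp
      have : p * p ≤ q * q := mul_le_mul (by omega) (by omega) (by omega) (by omega)
      omega

-- assembling B's fold: count and sum of the kept elements
theorem foldl_count_sum (l : List Int) (f : Int → Bool) (c t : Int) :
    l.foldl (fun acc k => if f k then (acc.1 + 1, acc.2 + k) else acc) (c, t)
      = (c + ((l.filter f).length : Int), t + (l.filter f).sum) := by
  induction l generalizing c t with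
  | nil => simp
  | cons x xs ih =>
    by_cases h : f x = true
    · simp only [List.foldl_cons, h, if_true, ih, List.filter_cons_of_pos h]
      rw [Prod.mk.injEq]
      constructor <;> simp <;> ring
    · rw [List.foldl_cons, if_neg (by simp [h]), ih, List.filter_cons_of_neg (by simp [h])]

-- ===== VERDICT (by name: the statement is the Claim_ definition above) =====
theorem solve_spec : Claim_equal_solve := by
  intro n _
  show solve n = solve_alt n
  simp only [solve, solve_alt]
  by_cases hn : n ≤ 2
  · have hr : PySem.List.pyRange 2 n 1 = [] := by
      rw [PySem.List.pyRange_one]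
      have h0 : (n - 2).toNat = 0 := by omega
      rw [h0]
      rfl
    simp [hr]
  · rw [not_le] at hn
    have hrep : PySem.List.pyRepeat [true] (n + 1) = List.replicate (n + 1).toNat true :=
      PySem.List.pyRepeat_singleton true (n + 1)
    have hlen0 : (PySem.List.pyRepeat [true] (n + 1)).length = (n + 1).toNat := by
      rw [hrep, List.length_replicate]
    have hinv0 : ∀ j : Nat, (j : Int) ≤ n →
        ((PySem.List.pyRepeat [true] (n + 1)).getD j false = true ↔
          ¬ ∃ q : Int, 2 ≤ q ∧ q < 2 ∧ q * q ≤ (j : Int) ∧ q ∣ (j : Int)) := by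
      intro j hj
      have hjlt : j < (n + 1).toNat := by omega
      rw [hrep, List.getD_eq_getElem?_getD, List.getElem?_replicate, if_pos hjlt]
      simp only [Option.getD_some, true_iff]
      rintro ⟨q, h1, h2, _, _⟩
      omega
    have hchar := sieveLoop_getD n 2 (PySem.List.pyRepeat [true] (n + 1)) (by omega) hlen0 hinv0
    have hlenF : (sieveLoop n 2 (PySem.List.pyRepeat [true] (n + 1))).length = (n + 1).toNat := by
      rw [sieveLoop_length, hlen0]
    have hfeq : ∀ k ∈ PySem.List.pyRange 2 n 1,
        PySem.List.pyGetD (sieveLoop n 2 (PySem.List.pyRepeat [true] (n + 1))) k true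
          = trialLoop k 2 := by
      intro k hk
      rw [PySem.List.mem_pyRange_one] at hk
      have hk0 : (k.toNat : Int) = k := by omega
      have hlt : k.toNat < (sieveLoop n 2 (PySem.List.pyRepeat [true] (n + 1))).length := by
        rw [hlenF]; omega
      have e1 : PySem.List.pyGetD (sieveLoop n 2 (PySem.List.pyRepeat [true] (n + 1))) k true
          = (sieveLoop n 2 (PySem.List.pyRepeat [true] (n + 1)))[k.toNat] :=
        PySem.List.pyGetD_eq_getElem _ true (by omega) (by rw [hlenF]; omega)
      have e2 : (sieveLoop n 2 (PySem.List.pyRepeat [true] (n + 1))).getD k.toNat false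
          = (sieveLoop n 2 (PySem.List.pyRepeat [true] (n + 1)))[k.toNat] := by
        rw [List.getD_eq_getElem?_getD, List.getElem?_eq_getElem hlt]
        rfl
      have h3 := hchar k.toNat (by omega)
      rw [hk0, e2] at h3
      have h4 : (trialLoop k 2 = true) ↔ ¬ hasSmallDiv k := trialLoop_iff k 2 (by omega)
      rw [Bool.eq_iff_iff, e1, h3, h4]
    rw [List.filter_congr hfeq, foldl_count_sum]
    simp
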